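-- pv_equiv track=rewrite | github.com/softeer5th/data_engineering_course_materials | mini_project/web_keyword_visualizer/app.py | combine_distances
-- ===== SOURCE A (Python) =====
-- def combine_distances(all_distances_list):
--     word_distances = {}
--     for distances in all_distances_list:
--         for word, distance in distances:
--             if word not in word_distances:
--                 word_distances[word] = []
--             word_distances[word].append(distance)
--
--     avg_distances = [
--         (word, sum(distances)) for word, distances in word_distances.items()
--     ]
--     return sorted(avg_distances, key=lambda x: x[1], reverse=True)
-- ===== SOURCE B (Python) =====
-- def combine_distances(all_distances_list):
--     flat = [pair for distances in all_distances_list for pair in distances]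
--     order = []
--     for word, _ in flat:
--         if word not in order:
--             order.append(word)
--     totals = [(word, sum(d for w, d in flat if w == word)) for word in order]
--     totals.sort(key=lambda x: x[1], reverse=True)
--     return totals
-- ===== Notes on version B (the rewrite author's own statement) =====
-- stated objective: alternative
-- what changed: B drops the dictionary entirely: it flattens the input, collects distinct words in first-occurrence order with a list, and computes each word's total by a separate scan over the flat pair list (nested scans, O(n*k)) before one descending stable sort, instead of A's one-pass hash grouping into lists plus a summing comprehension.
import Mathlib
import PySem

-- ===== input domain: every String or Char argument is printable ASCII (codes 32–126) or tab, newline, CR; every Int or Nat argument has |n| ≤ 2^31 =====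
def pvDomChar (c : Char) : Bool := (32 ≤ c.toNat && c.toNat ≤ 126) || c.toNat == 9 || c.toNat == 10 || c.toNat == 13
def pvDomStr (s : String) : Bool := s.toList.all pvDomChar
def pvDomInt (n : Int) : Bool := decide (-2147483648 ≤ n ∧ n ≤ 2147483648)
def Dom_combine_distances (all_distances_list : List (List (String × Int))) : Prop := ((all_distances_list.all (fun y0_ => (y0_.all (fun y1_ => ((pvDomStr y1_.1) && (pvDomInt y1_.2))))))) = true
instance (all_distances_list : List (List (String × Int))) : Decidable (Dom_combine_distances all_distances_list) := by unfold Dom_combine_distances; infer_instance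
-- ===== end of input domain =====

-- B is an alternative, dictionary-free algorithm: flatten, list of first-occurrence words, per-word scan sums, then sort.

-- ===== PORT A =====
-- group every distance into a per-word list in a dict, then sum each list, then sort descending by the sum
def combine_distances (all_distances_list : List (List (String × Int))) : List (String × Int) :=
  let word_distances : PySem.Dict String (List Int) :=
    all_distances_list.foldl (fun d distances =>
      distances.foldl (fun d p =>
        let d1 := if d.contains p.1 then d else d.insert p.1 ([] : List Int)
        d1.insert p.1 (d1.getD p.1 [] ++ [p.2])) d) PySem.Dict.empty
  let avg_distances := word_distances.items.map (fun q => (q.1, q.2.sum))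
  PySem.List.sorted avg_distances (fun x => x.2) true

-- ===== PORT B =====
-- flatten; collect distinct words in first-occurrence order in a list; sum each word by scanning flat; sort descending
def combine_distances_alt (all_distances_list : List (List (String × Int))) : List (String × Int) :=
  let flat := all_distances_list.flatMap (fun distances => distances)
  let order := flat.foldl (fun order p => if order.contains p.1 then order else order ++ [p.1]) []
  let totals := order.map (fun word => (word, ((flat.filter (fun q => q.1 == word)).map (·.2)).sum))
  PySem.List.sorted totals (fun x => x.2) true

-- ===== PRECONDITION & SPEC =====
def Spec_combine_distances (all_distances_list : List (List (String × Int))) (out : List (String × Int)) : Prop := out = combine_distances_alt all_distances_list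
instance (all_distances_list : List (List (String × Int))) (out : List (String × Int)) : Decidable (Spec_combine_distances all_distances_list out) := by unfold Spec_combine_distances; infer_instance

-- ===== CLAIM (what is proved, stated in full; the proofs are below) =====
def Claim_equal_combine_distances : Prop := ∀ (all_distances_list : List (List (String × Int))), Dom_combine_distances all_distances_list → Spec_combine_distances all_distances_list (combine_distances all_distances_list)

-- ===== LEMMAS AND PROOFS =====

-- A's inner step (set-default-to-[] then append) is Python's d[k] = d.get(k, []) + [v]
theorem stepA_eq_modify (d : PySem.Dict String (List Int)) (p : String × Int) :
    (let d1 := if d.contains p.1 then d else d.insert p.1 ([] : List Int)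
     d1.insert p.1 (d1.getD p.1 [] ++ [p.2])) = d.modify p.1 [] (· ++ [p.2]) := by
  by_cases h : d.contains p.1
  · simp [h, PySem.Dict.modify]
  · simp only [Bool.not_eq_true] at h
    simp [h, PySem.Dict.modify, PySem.Dict.getD_insert_self,
      PySem.Dict.insert_insert_self, PySem.Dict.getD_of_not_contains d [] h]

theorem combine_distances_spec : Claim_equal_combine_distances := by
  intro xs _
  unfold Spec_combine_distances combine_distances combine_distances_alt
  -- A's double fold = a fold over the flattened pair list
  have hA : (xs.foldl (fun d distances =>
        distances.foldl (fun d p =>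
          let d1 := if d.contains p.1 then d else d.insert p.1 ([] : List Int)
          d1.insert p.1 (d1.getD p.1 [] ++ [p.2])) d) PySem.Dict.empty)
      = xs.flatten.foldl (fun d p => d.modify p.1 [] (· ++ [p.2])) PySem.Dict.empty := by
    rw [List.foldl_flatten]
    simp only [stepA_eq_modify]
  rw [hA]
  have hflat : xs.flatMap (fun distances => distances) = xs.flatten := by
    simp [List.flatMap]
  rw [hflat]
  set l := xs.flatten with hl
  set dA := l.foldl (fun d p => d.modify p.1 [] (· ++ [p.2])) PySem.Dict.empty with hdA
  -- B's order list is exactly PySem.Set.update [] (l.map fst), which is A's key list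
  have horder : ∀ (t : List (String × Int)) (s : List String),
      (t.foldl (fun order p => if order.contains p.1 then order else order ++ [p.1]) s)
      = PySem.Set.update s (t.map Prod.fst) := by
    intro t
    induction t with
    | nil => intro s; rfl
    | cons p tl ih => intro s; simp [PySem.Set.update, PySem.Set.add] at *; exact ih _
  have hkA : dA.keys = PySem.Set.update [] (l.map Prod.fst) := by
    rw [hdA]
    simpa using PySem.Dict.keys_foldl_modify_key l Prod.fst []
      (fun _ p v => v ++ [p.2]) PySem.Dict.empty
  have hndA : dA.keys.Nodup := by
    rw [hdA]
    exact PySem.Dict.nodup_keys_foldl_modify_key l Prod.fst []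
      (fun _ p v => v ++ [p.2]) PySem.Dict.empty (by simp)
  -- the lists handed to the sorts are equal
  have hitems : dA.items.map (fun q => (q.1, q.2.sum))
      = (PySem.Set.update [] (l.map Prod.fst)).map
          (fun word => (word, ((l.filter (fun q => q.1 == word)).map (·.2)).sum)) := by
    rw [PySem.Dict.items_eq_map_keys dA hndA [], hkA, List.map_map]
    refine List.map_congr_left (fun k _ => ?_)
    have h1 : dA.getD k [] = (l.filter (fun p => p.1 == k)).map (·.2) := by
      rw [hdA]; simpa using PySem.Dict.getD_foldl_modify_append l PySem.Dict.empty k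
    simp [Function.comp, h1]
  simp only [hitems, horder l []]
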